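-- pv_equiv track=rewrite | github.com/aymenazzahidi/Python | Analyseurdetexte.py | statistiques_par_type_mot
-- ===== SOURCE A (Python) =====
-- def statistiques_par_type_mot(mots):
--     stats = {"majuscule": 0, "minuscule": 0, "numerique": 0}
--     for m in mots:
--         if m.isupper():
--             stats["majuscule"] += 1
--         elif m.islower():
--             stats["minuscule"] += 1
--         elif m.isdigit():
--             stats["numerique"] += 1
--     return stats
-- ===== SOURCE B (Python) =====
-- def statistiques_par_type_mot(mots):
--     mots = list(mots)  # materialise so the three passes see the same items
--     return {
--         "majuscule": sum(m.isupper() for m in mots),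
--         "minuscule": sum(m.islower() for m in mots),
--         "numerique": sum(m.isdigit() for m in mots),
--     }
-- ===== Notes on version B (the rewrite author's own statement) =====
-- stated objective: alternative
-- what changed: Replaced the single loop with prioritized elif branches updating a dict by three independent single-predicate counting passes (sum of isupper/islower/isdigit), correct because the three string predicates are mutually exclusive.
import Mathlib
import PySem

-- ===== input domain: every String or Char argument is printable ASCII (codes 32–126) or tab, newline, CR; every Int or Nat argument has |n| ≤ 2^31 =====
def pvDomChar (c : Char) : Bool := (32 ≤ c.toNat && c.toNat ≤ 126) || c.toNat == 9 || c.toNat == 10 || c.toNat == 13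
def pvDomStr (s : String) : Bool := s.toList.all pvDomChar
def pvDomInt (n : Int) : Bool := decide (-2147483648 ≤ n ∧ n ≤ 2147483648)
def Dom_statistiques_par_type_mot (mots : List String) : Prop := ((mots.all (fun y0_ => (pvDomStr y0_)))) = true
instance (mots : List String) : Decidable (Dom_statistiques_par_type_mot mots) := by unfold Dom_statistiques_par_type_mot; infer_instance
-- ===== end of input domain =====

-- B replaces A's one prioritized-branch loop by three independent single-predicate
-- counting passes (the predicates are mutually exclusive); alternative decomposition, same cost.

-- ===== PORT A =====
-- hand port of Python str.isupper / str.islower (exact on ASCII: cased chars are letters):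
-- at least one cased character and no cased character of the other case
def pyStrIsupper (cs : List Char) : Bool :=
  cs.any PySem.Chars.isalpha && cs.all (fun c => !PySem.Chars.islower c)

def pyStrIslower (cs : List Char) : Bool :=
  cs.any PySem.Chars.isalpha && cs.all (fun c => !PySem.Chars.isupper c)

def statistiques_par_type_mot (mots : List String) : List (String × Int) :=
  let stats : PySem.Dict String Int :=
    ⟨[("majuscule", 0), ("minuscule", 0), ("numerique", 0)]⟩
  (mots.foldl (fun d m =>
      if pyStrIsupper m.toList then d.modify "majuscule" 0 (· + 1)
      else if pyStrIslower m.toList then d.modify "minuscule" 0 (· + 1)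
      else if PySem.Str.strIsdigit m then d.modify "numerique" 0 (· + 1)
      else d) stats).items

-- ===== PORT B =====
-- sum(<bool> for m in mots) : a fold adding 1 per word satisfying p
def pySumB (p : String → Bool) (l : List String) : Int :=
  l.foldl (fun s m => s + (if p m then 1 else 0)) 0

def statistiques_par_type_mot_alt (mots : List String) : List (String × Int) :=
  [("majuscule", pySumB (fun m => pyStrIsupper m.toList) mots),
   ("minuscule", pySumB (fun m => pyStrIslower m.toList) mots),
   ("numerique", pySumB (fun m => PySem.Str.strIsdigit m) mots)]

-- ===== PRECONDITION & SPEC =====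
def Spec_statistiques_par_type_mot (mots : List String) (out : List (String × Int)) : Prop := out = statistiques_par_type_mot_alt mots
instance (mots : List String) (out : List (String × Int)) : Decidable (Spec_statistiques_par_type_mot mots out) := by unfold Spec_statistiques_par_type_mot; infer_instance

-- ===== CLAIM (what is proved, stated in full; the proofs are below) =====
def Claim_equal_statistiques_par_type_mot : Prop := ∀ (mots : List String), Dom_statistiques_par_type_mot mots → Spec_statistiques_par_type_mot mots (statistiques_par_type_mot mots)

-- ===== LEMMAS AND PROOFS =====

-- ===== VERDICT (by name: the statement is the Claim_ definition above) =====
lemma char_cases (c : Char) :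
    (PySem.Chars.isalpha c = true → (PySem.Chars.islower c = true ∨ PySem.Chars.isupper c = true))
    ∧ (PySem.Chars.isdigit c = true → PySem.Chars.isalpha c = false) := by
  simp [PySem.Chars.isalpha, PySem.Chars.isdigit, PySem.Chars.isupper, PySem.Chars.islower,
    Char.le_def, UInt32.le_iff_toNat_le]
  omega

lemma upper_not_lower (cs : List Char) (h : pyStrIsupper cs = true) :
    pyStrIslower cs = false := by
  unfold pyStrIsupper at h
  unfold pyStrIslower
  simp only [Bool.and_eq_true, List.any_eq_true, List.all_eq_true] at h ⊢
  obtain ⟨⟨c, hc, ha⟩, hall⟩ := h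
  rcases (char_cases c).1 ha with hl | hu
  · have := hall c hc; simp [hl] at this
  · simp only [Bool.and_eq_false_iff, List.all_eq_false]
    right
    exact ⟨c, hc, by simp [hu]⟩

lemma any_alpha_not_digit (cs : List Char) (h : cs.any PySem.Chars.isalpha = true) :
    PySem.Chars.strIsdigit cs = false := by
  unfold PySem.Chars.strIsdigit
  simp only [List.any_eq_true] at h
  obtain ⟨c, hc, ha⟩ := h
  simp only [Bool.and_eq_false_iff, List.all_eq_false]
  right
  exact ⟨c, hc, by have := (char_cases c).2; intro hd; simp [this hd] at ha⟩

lemma upper_not_digit (cs : List Char) (h : pyStrIsupper cs = true) :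
    PySem.Chars.strIsdigit cs = false := by
  unfold pyStrIsupper at h
  exact any_alpha_not_digit cs (by simp_all)

lemma lower_not_digit (cs : List Char) (h : pyStrIslower cs = true) :
    PySem.Chars.strIsdigit cs = false := by
  unfold pyStrIslower at h
  exact any_alpha_not_digit cs (by simp_all)

lemma pySumB_shift (p : String → Bool) (l : List String) (s : Int) :
    l.foldl (fun s m => s + (if p m then 1 else 0)) s
      = s + pySumB p l := by
  induction l generalizing s with
  | nil => simp [pySumB]
  | cons x xs ih =>
    simp only [List.foldl_cons, pySumB, List.foldl_cons] at *
    rw [ih, ih (0 + _)]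
    ring

lemma pySumB_cons (p : String → Bool) (x : String) (xs : List String) :
    pySumB p (x :: xs) = (if p x then 1 else 0) + pySumB p xs := by
  rw [show pySumB p (x :: xs)
        = List.foldl (fun s m => s + (if p m then 1 else 0)) (0 + (if p x then 1 else 0)) xs
      from rfl, pySumB_shift, zero_add]

lemma modify_key (k : String) {a b c va vb vc : Int}
    (hk : k = "majuscule" ∨ k = "minuscule" ∨ k = "numerique")
    (ha : va = (if k = "majuscule" then a + 1 else a))
    (hb : vb = (if k = "minuscule" then b + 1 else b))
    (hc : vc = (if k = "numerique" then c + 1 else c)) :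
    (⟨[("majuscule", a), ("minuscule", b), ("numerique", c)]⟩ : PySem.Dict String Int).modify k 0 (· + 1)
      = ⟨[("majuscule", va), ("minuscule", vb), ("numerique", vc)]⟩ := by
  subst ha hb hc
  by_cases h1 : k = "majuscule"
  · subst h1
    simp [PySem.Dict.modify, PySem.Dict.insert, PySem.Dict.getD, PySem.Dict.get?,
      PySem.Dict.contains]
  · by_cases h2 : k = "minuscule"
    · subst h2
      simp [PySem.Dict.modify, PySem.Dict.insert, PySem.Dict.getD, PySem.Dict.get?,
        PySem.Dict.contains]
    · rcases hk with h | h | h <;> first | exact absurd h h1 | exact absurd h h2 | skip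
      subst h
      simp [PySem.Dict.modify, PySem.Dict.insert, PySem.Dict.getD, PySem.Dict.get?,
        PySem.Dict.contains]

lemma fold_items (mots : List String) (a b c : Int) :
    (mots.foldl (fun d m =>
      if pyStrIsupper m.toList then d.modify "majuscule" 0 (· + 1)
      else if pyStrIslower m.toList then d.modify "minuscule" 0 (· + 1)
      else if PySem.Str.strIsdigit m then d.modify "numerique" 0 (· + 1)
      else d) (⟨[("majuscule", a), ("minuscule", b), ("numerique", c)]⟩ : PySem.Dict String Int)).items
    = [("majuscule", a + pySumB (fun m => pyStrIsupper m.toList) mots),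
       ("minuscule", b + pySumB (fun m => pyStrIslower m.toList) mots),
       ("numerique", c + pySumB (fun m => PySem.Str.strIsdigit m) mots)] := by
  induction mots generalizing a b c with
  | nil => simp [pySumB]
  | cons x xs ih =>
    simp only [List.foldl_cons]
    by_cases hu : pyStrIsupper x.toList = true
    · have hl := upper_not_lower x.toList hu
      have hd := upper_not_digit x.toList hu
      rw [if_pos hu, modify_key "majuscule" (Or.inl rfl) rfl rfl rfl, ih]
      simp [pySumB_cons, hu, hl, hd, PySem.Str.strIsdigit, add_assoc]
    · by_cases hl : pyStrIslower x.toList = true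
      · have hd := lower_not_digit x.toList hl
        rw [if_neg hu, if_pos hl, modify_key "minuscule" (Or.inr (Or.inl rfl)) rfl rfl rfl, ih]
        simp [pySumB_cons, hu, hl, hd, PySem.Str.strIsdigit, add_assoc]
      · by_cases hd : PySem.Str.strIsdigit x = true
        · rw [if_neg hu, if_neg hl, if_pos hd, modify_key "numerique" (Or.inr (Or.inr rfl)) rfl rfl rfl, ih]
          simp only [PySem.Str.strIsdigit] at hd
          simp [pySumB_cons, hu, hl, hd, PySem.Str.strIsdigit, add_assoc]
        · rw [if_neg hu, if_neg hl, if_neg hd, ih]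
          simp only [PySem.Str.strIsdigit] at hd
          simp [pySumB_cons, hu, hl, hd, PySem.Str.strIsdigit]

theorem statistiques_par_type_mot_spec : Claim_equal_statistiques_par_type_mot := by
  intro mots _
  unfold Spec_statistiques_par_type_mot
  simp only [statistiques_par_type_mot, statistiques_par_type_mot_alt, fold_items, zero_add]
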